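-- pv_equiv track=rewrite | github.com/8eomio/CodingTest | 선형_자료구조/배열_리스트/바탕화면_정리.py | solution
-- ===== SOURCE A (Python) =====
-- def solution(wallpaper):
--     points = []
--     for i, line in enumerate(wallpaper):
--         for j, point in enumerate(line):
--             if point == "#":
--                 points.append([i,j])
--     minx,miny, maxx, maxy = points[0][1], points[0][0], points[0][1], points[0][0]
--
--     for file in points:
--         miny = min(file[0], miny)
--         minx = min(file[1], minx)
--         maxy = max(file[0]+1, maxy)
--         maxx = max(file[1]+1, maxx)
--     return [miny, minx, maxy, maxx]
-- ===== SOURCE B (Python) =====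
-- def solution(wallpaper):
--     # row bounds: directional scans with early exit (top-down / bottom-up)
--     top = 0
--     while '#' not in wallpaper[top]:
--         top += 1
--     bottom = len(wallpaper) - 1
--     while '#' not in wallpaper[bottom]:
--         bottom -= 1
--     # column bounds: per-line first/last occurrence, reduced over the lines with a '#'
--     left = min(line.index('#') for line in wallpaper if '#' in line)
--     right = max(len(line) - 1 - line[::-1].index('#') for line in wallpaper if '#' in line)
--     return [top, left, bottom + 1, right + 1]
-- ===== Notes on version B (the rewrite author's own statement) =====
-- stated objective: alternative
-- what changed: A collects every '#' coordinate into one list and folds four running min/max values over it; B never builds a point list: it finds the top and bottom rows by directional early-exit scans (top-down, bottom-up) and the column bounds from each line's first ('#'.index) and last (reversed index) occurrence, reduced with min/max over the lines.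
import Mathlib
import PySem

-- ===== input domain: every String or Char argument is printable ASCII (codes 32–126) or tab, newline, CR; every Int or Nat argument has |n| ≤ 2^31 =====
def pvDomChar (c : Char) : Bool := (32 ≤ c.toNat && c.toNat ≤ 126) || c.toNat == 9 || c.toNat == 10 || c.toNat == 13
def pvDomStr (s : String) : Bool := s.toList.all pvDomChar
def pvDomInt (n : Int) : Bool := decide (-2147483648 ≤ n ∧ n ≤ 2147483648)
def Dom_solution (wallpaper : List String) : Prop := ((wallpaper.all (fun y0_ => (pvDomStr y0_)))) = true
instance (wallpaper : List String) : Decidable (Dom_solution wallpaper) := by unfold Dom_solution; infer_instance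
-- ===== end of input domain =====

-- B finds the top/bottom rows by directional early-exit scans and the column bounds from each
-- line's first/last '#' occurrence, instead of A's single point list with a four-way min/max fold.

-- ===== PORT A =====
def solution (wallpaper : List String) : List Int :=
  let points : List (Int × Int) :=
    (PySem.List.enumerate wallpaper).foldl
      (fun acc p =>
        (PySem.List.enumerate p.2.toList).foldl
          (fun acc2 q => if q.2 = '#' then acc2 ++ [(p.1, q.1)] else acc2) acc)
      []
  match points with
  | [] => []  -- Python raises IndexError here (points[0]); excluded by Pre_solution
  | p0 :: _ =>
    -- state (minx, miny, maxx, maxy), exactly Python's four running variables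
    let r := points.foldl
      (fun (st : Int × Int × Int × Int) f =>
        (min f.2 st.1, min f.1 st.2.1, max (f.2 + 1) st.2.2.1, max (f.1 + 1) st.2.2.2))
      (p0.2, p0.1, p0.2, p0.1)
    [r.2.1, r.1, r.2.2.2, r.2.2.1]

-- ===== PORT B =====
-- top-down scan: `while '#' not in wallpaper[top]: top += 1`
-- ('#' in line is membership of the one-character needle, exact as char membership;
--  past the end Python raises IndexError — excluded by Pre_solution, here the index is returned)
def scanTop (wallpaper : List String) (i : Nat) : Nat :=
  if h : i < wallpaper.length then
    if (wallpaper[i]).toList.contains '#' then i else scanTop wallpaper (i + 1)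
  else i
termination_by wallpaper.length - i

-- bottom-up scan: `while '#' not in wallpaper[bottom]: bottom -= 1`
-- (a run past index 0 would wrap in Python; unreachable under Pre_solution)
def scanBot (wallpaper : List String) (i : Nat) : Nat :=
  if (wallpaper.getD i "").toList.contains '#' then i
  else if _ : i = 0 then 0 else scanBot wallpaper (i - 1)
termination_by i

-- line.index('#') : first index of '#' (guarded by `if '#' in line`, so getD 0 is unreachable)
def firstHash (cs : List Char) : Int := ((PySem.List.index? cs '#').getD 0 : Nat)
-- len(line) - 1 - line[::-1].index('#') : last index of '#' (same guard)
def lastHash (cs : List Char) : Int :=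
  (cs.length : Int) - 1 - ((PySem.List.index? cs.reverse '#').getD 0 : Nat)

def solution_alt (wallpaper : List String) : List Int :=
  let top : Int := scanTop wallpaper 0
  let bottom : Int := scanBot wallpaper (wallpaper.length - 1)
  let lefts : List Int :=
    wallpaper.filterMap (fun line =>
      if line.toList.contains '#' then some (firstHash line.toList) else none)
  let rights : List Int :=
    wallpaper.filterMap (fun line =>
      if line.toList.contains '#' then some (lastHash line.toList) else none)
  [top, (PySem.List.min? lefts (fun y => y)).getD 0, bottom + 1,
   (PySem.List.max? rights (fun y => y)).getD 0 + 1]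

-- ===== PRECONDITION & SPEC =====
-- Pre_: some line contains '#'; otherwise A raises IndexError (points[0]) and B raises
-- IndexError too (the top-down scan runs off the end).
def Pre_solution (wallpaper : List String) : Prop := ∃ s ∈ wallpaper, '#' ∈ s.toList
instance (wallpaper : List String) : Decidable (Pre_solution wallpaper) := by
  unfold Pre_solution; infer_instance
def pvWitness_solution : List String := [".#", "#."]
def Spec_solution (wallpaper : List String) (out : List Int) : Prop := out = solution_alt wallpaper
instance (wallpaper : List String) (out : List Int) : Decidable (Spec_solution wallpaper out) := by
  unfold Spec_solution; infer_instance

-- ===== CLAIM (what is proved, stated in full; the proofs are below) =====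
def Claim_equal_solution : Prop := ∀ (wallpaper : List String), Dom_solution wallpaper → Pre_solution wallpaper → Spec_solution wallpaper (solution wallpaper)

-- ===== LEMMAS AND PROOFS =====

-- canonical form both ports are reduced to
def rowsOf (w : List String) : List Int :=
  (PySem.List.enumerate w).filterMap
    (fun p => if p.2.toList.contains '#' then some p.1 else none)

def lineColsI (cs : List Char) : List Int :=
  (PySem.List.enumerate cs).filterMap (fun q => if q.2 = '#' then some q.1 else none)

def colsOf (w : List String) : List Int := w.flatMap (fun line => lineColsI line.toList)

def canon (w : List String) : List Int :=
  [(PySem.List.min? (rowsOf w) (fun y => y)).getD 0,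
   (PySem.List.min? (colsOf w) (fun y => y)).getD 0,
   (PySem.List.max? (rowsOf w) (fun y => y)).getD 0 + 1,
   (PySem.List.max? (colsOf w) (fun y => y)).getD 0 + 1]

-- ---------- A-side reduction to canon ----------

-- column indices of '#' in one line
def lineCols (cs : List Char) : List Int :=
  ((PySem.List.enumerate cs).filter (fun q => decide (q.2 = '#'))).map (·.1)

-- the points contributed by one line
def linePts (i : Int) (cs : List Char) : List (Int × Int) :=
  ((PySem.List.enumerate cs).filter (fun q => decide (q.2 = '#'))).map (fun q => (i, q.1))

-- Python's min/max over Option accumulators (first extremal kept)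
def omin : Option Int → Option Int → Option Int
  | none, o => o
  | some a, none => some a
  | some a, some b => some (if b < a then b else a)

def omax : Option Int → Option Int → Option Int
  | none, o => o
  | some a, none => some a
  | some a, some b => some (if a < b then b else a)

lemma filterMap_ite {α β : Type} (p : α → Prop) [DecidablePred p] (f : α → β) (l : List α) :
    l.filterMap (fun x => if p x then some (f x) else none)
      = (l.filter (fun x => decide (p x))).map f := by
  induction l with
  | nil => rfl
  | cons x t ih => by_cases h : p x <;> simp [h, ih]

lemma omin_assoc (a b c : Option Int) : omin (omin a b) c = omin a (omin b c) := by
  rcases a with _ | a <;> rcases b with _ | b <;> rcases c with _ | c <;>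
    simp [omin] <;> split_ifs <;> simp_all <;> omega

lemma omax_assoc (a b c : Option Int) : omax (omax a b) c = omax a (omax b c) := by
  rcases a with _ | a <;> rcases b with _ | b <;> rcases c with _ | c <;>
    simp [omax] <;> split_ifs <;> simp_all <;> omega

lemma min?_eq_foldl (l : List Int) :
    PySem.List.min? l (fun y => y)
      = l.foldl (fun acc x => match acc with
          | none => some x
          | some m => if x < m then some x else some m) none := by
  rw [PySem.List.min?]
  congr 1
  funext acc x
  cases acc <;> rfl

lemma max?_eq_foldl (l : List Int) :
    PySem.List.max? l (fun y => y)
      = l.foldl (fun acc x => match acc with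
          | none => some x
          | some m => if m < x then some x else some m) none := by
  rw [PySem.List.max?]
  congr 1
  funext acc x
  cases acc <;> rfl

lemma min?_foldl (b : List Int) (o : Option Int) :
    b.foldl (fun acc x => match acc with
      | none => some x
      | some m => if x < m then some x else some m) o
      = omin o (PySem.List.min? b (fun y => y)) := by
  induction b generalizing o with
  | nil => cases o <;> rfl
  | cons x t ih =>
    simp only [List.foldl_cons]
    rw [ih]
    have hx : PySem.List.min? (x :: t) (fun y => y)
        = omin (some x) (PySem.List.min? t (fun y => y)) := by
      rw [← ih (some x), min?_eq_foldl, List.foldl_cons]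
    have ho : (match o with
      | none => some x
      | some m => if x < m then some x else some m) = omin o (some x) := by
      cases o with
      | none => rfl
      | some a => by_cases h : x < a <;> simp [omin, h]
    rw [hx, ho, omin_assoc]

lemma max?_foldl (b : List Int) (o : Option Int) :
    b.foldl (fun acc x => match acc with
      | none => some x
      | some m => if m < x then some x else some m) o
      = omax o (PySem.List.max? b (fun y => y)) := by
  induction b generalizing o with
  | nil => cases o <;> rfl
  | cons x t ih =>
    simp only [List.foldl_cons]
    rw [ih]
    have hx : PySem.List.max? (x :: t) (fun y => y)
        = omax (some x) (PySem.List.max? t (fun y => y)) := by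
      rw [← ih (some x), max?_eq_foldl, List.foldl_cons]
    have ho : (match o with
      | none => some x
      | some m => if m < x then some x else some m) = omax o (some x) := by
      cases o with
      | none => rfl
      | some a => by_cases h : a < x <;> simp [omax, h]
    rw [hx, ho, omax_assoc]

lemma min?_append (a b : List Int) :
    PySem.List.min? (a ++ b) (fun y => y)
      = omin (PySem.List.min? a (fun y => y)) (PySem.List.min? b (fun y => y)) := by
  rw [min?_eq_foldl (a ++ b), List.foldl_append, ← min?_eq_foldl a, min?_foldl]

lemma max?_append (a b : List Int) :
    PySem.List.max? (a ++ b) (fun y => y)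
      = omax (PySem.List.max? a (fun y => y)) (PySem.List.max? b (fun y => y)) := by
  rw [max?_eq_foldl (a ++ b), List.foldl_append, ← max?_eq_foldl a, max?_foldl]

lemma min?_replicate (n : Nat) (i : Int) :
    PySem.List.min? (List.replicate n i) (fun y => y) = if n = 0 then none else some i := by
  induction n with
  | zero => rfl
  | succ m ih =>
    rw [List.replicate_succ, show (i :: List.replicate m i) = [i] ++ List.replicate m i from rfl,
      min?_append, ih]
    by_cases h : m = 0 <;> simp [h, PySem.List.min?, omin]

lemma max?_replicate (n : Nat) (i : Int) :
    PySem.List.max? (List.replicate n i) (fun y => y) = if n = 0 then none else some i := by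
  induction n with
  | zero => rfl
  | succ m ih =>
    rw [List.replicate_succ, show (i :: List.replicate m i) = [i] ++ List.replicate m i from rfl,
      max?_append, ih]
    by_cases h : m = 0 <;> simp [h, PySem.List.max?, omax]

lemma linePts_map_snd (i : Int) (cs : List Char) :
    (linePts i cs).map (·.2) = lineCols cs := by
  simp [linePts, lineCols, List.map_map, Function.comp]

lemma linePts_map_fst (i : Int) (cs : List Char) :
    (linePts i cs).map (·.1) = List.replicate (lineCols cs).length i := by
  simp [linePts, lineCols, List.map_map, Function.comp, List.eq_replicate_iff]

lemma lineCols_nil_iff (cs : List Char) :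
    lineCols cs = [] ↔ cs.contains '#' = false := by
  simp only [lineCols, List.map_eq_nil_iff, List.filter_eq_nil_iff]
  constructor
  · intro h
    by_contra hc
    simp only [Bool.not_eq_false, List.contains_eq_mem, decide_eq_true_eq] at hc
    obtain ⟨k, hk, he⟩ := List.mem_iff_getElem.1 hc
    have hmem : ((0 : Int) + k, cs[k]) ∈ PySem.List.enumerate cs 0 :=
      (PySem.List.mem_enumerate_iff cs 0 _).2 ⟨k, hk, rfl⟩
    exact h _ hmem (by simp [he])
  · intro h q hq
    have hnm : '#' ∉ cs := by simpa using h
    obtain ⟨k, hk, rfl⟩ := (PySem.List.mem_enumerate_iff cs 0 q).1 hq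
    simp only [decide_eq_true_eq]
    intro he
    exact hnm (he ▸ List.getElem_mem hk)

-- the four-variable fold splits into four independent folds
lemma fold4 (l : List (Int × Int)) (a b c d : Int) :
    l.foldl (fun (st : Int × Int × Int × Int) f =>
        (min f.2 st.1, min f.1 st.2.1, max (f.2 + 1) st.2.2.1, max (f.1 + 1) st.2.2.2))
      (a, b, c, d)
      = (l.foldl (fun x f => min f.2 x) a, l.foldl (fun x f => min f.1 x) b,
         l.foldl (fun x f => max (f.2 + 1) x) c, l.foldl (fun x f => max (f.1 + 1) x) d) := by
  induction l generalizing a b c d with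
  | nil => rfl
  | cons x t ih => simp [ih]

lemma foldl_flip_min (l : List Int) (a : Int) :
    l.foldl (fun x y => min y x) a = l.foldl min a := by
  induction l generalizing a with
  | nil => rfl
  | cons x t ih => simp [min_comm]

lemma foldl_flip_max (l : List Int) (a : Int) :
    l.foldl (fun x y => max y x) a = l.foldl max a := by
  induction l generalizing a with
  | nil => rfl
  | cons x t ih => simp [max_comm]

lemma foldl_max_shift (l : List Int) (a : Int) :
    (l.map (· + 1)).foldl max (a + 1) = l.foldl max a + 1 := by
  induction l generalizing a with
  | nil => rfl
  | cons x t ih => simpa [max_add_add_right] using ih (max a x)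

-- row-indices reduction: min/max over the repeated row indices equal min/max over rows
lemma min?_rows (l : List (Int × String)) :
    PySem.List.min? (l.flatMap (fun p => List.replicate (lineCols p.2.toList).length p.1))
        (fun y => y)
      = PySem.List.min? (l.filterMap (fun p => if p.2.toList.contains '#' then some p.1 else none))
        (fun y => y) := by
  induction l with
  | nil => rfl
  | cons p t ih =>
    rw [List.flatMap_cons, min?_append, min?_replicate, List.filterMap_cons, ih]
    by_cases h : p.2.toList.contains '#' = true
    · have : (lineCols p.2.toList).length ≠ 0 := by
        intro h0
        rw [(lineCols_nil_iff p.2.toList).1 (List.length_eq_zero_iff.1 h0)] at h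
        exact absurd h (by simp)
      simp only [h, if_true, this, if_false]
      rw [show (p.1 :: t.filterMap fun p => if p.2.toList.contains '#' = true then some p.1 else none)
          = [p.1] ++ _ from rfl, min?_append]
      rfl
    · have hn : (lineCols p.2.toList).length = 0 := by
        rw [List.length_eq_zero_iff, lineCols_nil_iff]
        exact Bool.not_eq_true _ ▸ (by simpa using h)
      have h' : ¬ '#' ∈ p.2.toList := by simpa using h
      simp [h', hn, omin]

lemma max?_rows (l : List (Int × String)) :
    PySem.List.max? (l.flatMap (fun p => List.replicate (lineCols p.2.toList).length p.1))
        (fun y => y)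
      = PySem.List.max? (l.filterMap (fun p => if p.2.toList.contains '#' then some p.1 else none))
        (fun y => y) := by
  induction l with
  | nil => rfl
  | cons p t ih =>
    rw [List.flatMap_cons, max?_append, max?_replicate, List.filterMap_cons, ih]
    by_cases h : p.2.toList.contains '#' = true
    · have : (lineCols p.2.toList).length ≠ 0 := by
        intro h0
        rw [(lineCols_nil_iff p.2.toList).1 (List.length_eq_zero_iff.1 h0)] at h
        exact absurd h (by simp)
      simp only [h, if_true, this, if_false]
      rw [show (p.1 :: t.filterMap fun p => if p.2.toList.contains '#' = true then some p.1 else none)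
          = [p.1] ++ _ from rfl, max?_append]
      rfl
    · have hn : (lineCols p.2.toList).length = 0 := by
        rw [List.length_eq_zero_iff, lineCols_nil_iff]
        exact Bool.not_eq_true _ ▸ (by simpa using h)
      have h' : ¬ '#' ∈ p.2.toList := by simpa using h
      simp [h', hn, omax]

lemma linePts_nil_iff (i : Int) (cs : List Char) : linePts i cs = [] ↔ lineCols cs = [] := by
  simp [linePts, lineCols]

lemma pointsEq (wallpaper : List String) :
    (PySem.List.enumerate wallpaper).foldl
      (fun acc p =>
        (PySem.List.enumerate p.2.toList).foldl
          (fun acc2 q => if q.2 = '#' then acc2 ++ [(p.1, q.1)] else acc2) acc)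
      ([] : List (Int × Int))
    = (PySem.List.enumerate wallpaper).flatMap (fun p => linePts p.1 p.2.toList) := by
  have hfun : (fun (acc : List (Int × Int)) (p : Int × String) =>
      (PySem.List.enumerate p.2.toList).foldl
        (fun acc2 q => if q.2 = '#' then acc2 ++ [(p.1, q.1)] else acc2) acc)
      = fun acc p => acc ++ linePts p.1 p.2.toList := by
    funext acc p
    rw [PySem.List.foldl_append_ite (fun (q : Int × Char) => q.2 = '#') (fun (q : Int × Char) => (p.1, q.1))]
    rfl
  rw [hfun, PySem.List.foldl_append_eq_flatMap, List.nil_append]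

lemma foldlMinHead (y : Int) (t : List Int) :
    (y :: t).foldl min y = (PySem.List.min? (y :: t) (fun y => y)).getD 0 := by
  rw [PySem.List.min?_id_cons]
  simp

lemma foldlMaxHead (y : Int) (t : List Int) :
    ((y :: t).map (· + 1)).foldl max y = (PySem.List.max? (y :: t) (fun y => y)).getD 0 + 1 := by
  rw [PySem.List.max?_id_cons]
  have h1 : max y (y + 1) = y + 1 := by omega
  simp only [List.map_cons, List.foldl_cons, h1, foldl_max_shift, Option.getD_some]

lemma A_eq_canon (wallpaper : List String) (hpre : Pre_solution wallpaper) :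
    solution wallpaper = canon wallpaper := by
  obtain ⟨s, hs, hc⟩ := hpre
  have hpts := pointsEq wallpaper
  -- the flatMap of per-line points is nonempty
  have hne : (PySem.List.enumerate wallpaper).flatMap (fun p => linePts p.1 p.2.toList) ≠ [] := by
    intro h0
    obtain ⟨k, hk, he⟩ := List.mem_iff_getElem.1 hs
    have hmem : ((0 : Int) + k, wallpaper[k]) ∈ PySem.List.enumerate wallpaper 0 :=
      (PySem.List.mem_enumerate_iff wallpaper 0 _).2 ⟨k, hk, rfl⟩
    have := (List.flatMap_eq_nil_iff).1 h0 _ hmem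
    rw [linePts_nil_iff, lineCols_nil_iff, he] at this
    simp only [List.contains_eq_mem] at this
    simp [hc] at this
  simp only [solution, canon, rowsOf, colsOf, lineColsI, hpts]
  rcases hflat : (PySem.List.enumerate wallpaper).flatMap (fun p => linePts p.1 p.2.toList)
    with _ | ⟨p0, rest⟩
  · exact absurd hflat hne
  · rw [hflat]
    show [_,_,_,_] = _
    rw [fold4]
    -- the four reductions of A's running min/max folds
    have hminy : (p0 :: rest).foldl (fun x f => min f.1 x) p0.1
        = (PySem.List.min? ((p0 :: rest).map (·.1)) (fun y => y)).getD 0 := by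
      rw [show ((p0 :: rest).map (·.1)) = p0.1 :: rest.map (·.1) from List.map_cons .. ,
        ← foldlMinHead p0.1 (rest.map (·.1)), ← List.map_cons, ← foldl_flip_min, List.foldl_map]
    have hminx : (p0 :: rest).foldl (fun x f => min f.2 x) p0.2
        = (PySem.List.min? ((p0 :: rest).map (·.2)) (fun y => y)).getD 0 := by
      rw [show ((p0 :: rest).map (·.2)) = p0.2 :: rest.map (·.2) from List.map_cons .. ,
        ← foldlMinHead p0.2 (rest.map (·.2)), ← List.map_cons, ← foldl_flip_min, List.foldl_map]
    have hmaxy : (p0 :: rest).foldl (fun x f => max (f.1 + 1) x) p0.1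
        = (PySem.List.max? ((p0 :: rest).map (·.1)) (fun y => y)).getD 0 + 1 := by
      rw [show ((p0 :: rest).map (·.1)) = p0.1 :: rest.map (·.1) from List.map_cons .. ,
        ← foldlMaxHead p0.1 (rest.map (·.1)), ← List.map_cons, ← foldl_flip_max, List.foldl_map, List.foldl_map]
    have hmaxx : (p0 :: rest).foldl (fun x f => max (f.2 + 1) x) p0.2
        = (PySem.List.max? ((p0 :: rest).map (·.2)) (fun y => y)).getD 0 + 1 := by
      rw [show ((p0 :: rest).map (·.2)) = p0.2 :: rest.map (·.2) from List.map_cons .. ,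
        ← foldlMaxHead p0.2 (rest.map (·.2)), ← List.map_cons, ← foldl_flip_max, List.foldl_map, List.foldl_map]
    -- identify the row-index and column-index multisets
    have hys : (p0 :: rest).map (·.1)
        = (PySem.List.enumerate wallpaper).flatMap
            (fun p => List.replicate (lineCols p.2.toList).length p.1) := by
      rw [← hflat, List.map_flatMap]
      have hf : (fun p : Int × String => (linePts p.1 p.2.toList).map (·.1))
          = fun p => List.replicate (lineCols p.2.toList).length p.1 :=
        funext fun p => linePts_map_fst p.1 p.2.toList
      rw [hf]
    have hxs : (p0 :: rest).map (·.2)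
        = wallpaper.flatMap (fun line =>
            (PySem.List.enumerate line.toList).filterMap
              (fun q => if q.2 = '#' then some q.1 else none)) := by
      rw [← hflat, List.map_flatMap]
      have hf : (fun p : Int × String => (linePts p.1 p.2.toList).map (·.2))
          = fun p : Int × String =>
              (PySem.List.enumerate p.2.toList).filterMap
                (fun q => if q.2 = '#' then some q.1 else none) := by
        funext p
        rw [linePts_map_snd, filterMap_ite (fun (q : Int × Char) => q.2 = '#') (fun q => q.1)]
        rfl
      rw [hf]
      conv_rhs => rw [← PySem.List.map_snd_enumerate wallpaper 0]
      rw [List.flatMap_map]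
    simp only [hminy, hminx, hmaxy, hmaxx, hys, hxs, min?_rows, max?_rows]

-- ---------- B-side reduction to canon ----------

-- the predicate the two while loops test
def hashAt (w : List String) (k : Nat) : Bool := (w.getD k "").toList.contains '#'

lemma hashAt_lt {w : List String} {k : Nat} (h : hashAt w k = true) : k < w.length := by
  by_contra hk
  rw [hashAt, List.getD_eq_default _ _ (le_of_not_gt hk)] at h
  simp at h

lemma hashAt_eq {w : List String} {k : Nat} (h : k < w.length) :
    hashAt w k = (w[k]).toList.contains '#' := by
  rw [hashAt, List.getD_eq_getElem _ _ h]

lemma mem_rowsOf {w : List String} {r : Int} :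
    r ∈ rowsOf w ↔ ∃ (k : Nat), ∃ _ : k < w.length, r = (k : Int) ∧ hashAt w k = true := by
  simp only [rowsOf, List.mem_filterMap]
  constructor
  · rintro ⟨p, hp, hsome⟩
    obtain ⟨k, hk, rfl⟩ := (PySem.List.mem_enumerate_iff w 0 p).1 hp
    by_cases hc : (w[k]).toList.contains '#' = true
    · rw [if_pos hc, Option.some_inj] at hsome
      exact ⟨k, hk, by omega, by rw [hashAt_eq hk]; exact hc⟩
    · rw [if_neg hc] at hsome
      exact absurd hsome (by simp)
  · rintro ⟨k, hk, rfl, hc⟩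
    refine ⟨((0 : Int) + k, w[k]), (PySem.List.mem_enumerate_iff w 0 _).2 ⟨k, hk, rfl⟩, ?_⟩
    rw [hashAt_eq hk] at hc
    rw [if_pos hc, Option.some_inj]
    omega

lemma scanTop_spec (w : List String) (k : Nat) (hPk : hashAt w k = true) :
    ∀ i, i ≤ k → (∀ j, i ≤ j → j < k → hashAt w j = false) → scanTop w i = k := by
  have hkn := hashAt_lt hPk
  intro i
  induction hm : k - i generalizing i with
  | zero =>
    intro hik _
    have : i = k := by omega
    subst this
    rw [scanTop, dif_pos hkn, if_pos (by rw [← hashAt_eq hkn]; exact hPk)]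
  | succ m ih =>
    intro hik hmin
    have hin : i < w.length := by omega
    have hPi : hashAt w i = false := hmin i le_rfl (by omega)
    rw [scanTop, dif_pos hin, if_neg (by rw [← hashAt_eq hin, hPi]; simp)]
    exact ih (i + 1) (by omega) (by omega) (fun j hj hjk => hmin j (by omega) hjk)

lemma scanBot_spec (w : List String) (k : Nat) (hPk : hashAt w k = true) :
    ∀ i, k ≤ i → (∀ j, k < j → j ≤ i → hashAt w j = false) → scanBot w i = k := by
  intro i
  induction i with
  | zero =>
    intro hki _
    have : k = 0 := by omega
    subst this
    rw [scanBot, if_pos (show (w.getD 0 "").toList.contains '#' = true from hPk)]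
  | succ m ih =>
    intro hki hmax
    by_cases hek : k = m + 1
    · subst hek
      rw [scanBot, if_pos (show (w.getD (m + 1) "").toList.contains '#' = true from hPk)]
    · have hPi : (w.getD (m + 1) "").toList.contains '#' = false :=
        hmax (m + 1) (by omega) le_rfl
      rw [scanBot, if_neg (by rw [hPi]; simp), dif_neg (by omega)]
      exact ih (by omega) (fun j hj hjm => hmax j hj (by omega))

-- membership characterisations for the column lists
lemma mem_lineColsI {cs : List Char} {c : Int} :
    c ∈ lineColsI cs ↔ ∃ (k : Nat), ∃ _ : k < cs.length, c = (k : Int) ∧ cs[k] = '#' := by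
  simp only [lineColsI, List.mem_filterMap]
  constructor
  · rintro ⟨q, hq, hsome⟩
    obtain ⟨k, hk, rfl⟩ := (PySem.List.mem_enumerate_iff cs 0 q).1 hq
    by_cases hc : cs[k] = '#'
    · rw [if_pos hc, Option.some_inj] at hsome
      exact ⟨k, hk, by omega, hc⟩
    · rw [if_neg hc] at hsome
      exact absurd hsome (by simp)
  · rintro ⟨k, hk, rfl, hc⟩
    refine ⟨((0 : Int) + k, cs[k]), (PySem.List.mem_enumerate_iff cs 0 _).2 ⟨k, hk, rfl⟩, ?_⟩
    rw [if_pos hc, Option.some_inj]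
    omega

lemma firstHash_spec {cs : List Char} (h : '#' ∈ cs) :
    firstHash cs ∈ lineColsI cs ∧ ∀ c ∈ lineColsI cs, firstHash cs ≤ c := by
  obtain ⟨f, hf⟩ := Option.isSome_iff_exists.1 ((PySem.List.index?_isSome_iff cs '#').2 h)
  obtain ⟨hflt, hfget, hfmin⟩ := PySem.List.getElem_of_index?_eq_some hf
  have hfv : firstHash cs = (f : Int) := by rw [firstHash, hf]; rfl
  constructor
  · rw [hfv]; exact mem_lineColsI.2 ⟨f, hflt, rfl, hfget⟩
  · intro c hc
    obtain ⟨k, hk, rfl, hck⟩ := mem_lineColsI.1 hc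
    rw [hfv]
    by_contra hlt
    have hkf : k < f := by omega
    exact hfmin k hkf hck

lemma lastHash_spec {cs : List Char} (h : '#' ∈ cs) :
    lastHash cs ∈ lineColsI cs ∧ ∀ c ∈ lineColsI cs, c ≤ lastHash cs := by
  have hrev : '#' ∈ cs.reverse := List.mem_reverse.2 h
  obtain ⟨g, hg⟩ := Option.isSome_iff_exists.1 ((PySem.List.index?_isSome_iff cs.reverse '#').2 hrev)
  obtain ⟨hglt, hgget, hgmin⟩ := PySem.List.getElem_of_index?_eq_some hg
  have hglen : g < cs.length := by simpa using hglt
  have hgv : lastHash cs = ((cs.length - 1 - g : Nat) : Int) := by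
    rw [lastHash, hg]
    push_cast [Option.getD_some]
    omega
  have hgget' : cs[cs.length - 1 - g]'(by omega) = '#' := by
    have := List.getElem_reverse (l := cs) (i := g) (h := hglt)
    rw [this] at hgget
    exact hgget
  constructor
  · rw [hgv]; exact mem_lineColsI.2 ⟨cs.length - 1 - g, by omega, rfl, hgget'⟩
  · intro c hc
    obtain ⟨k, hk, rfl, hck⟩ := mem_lineColsI.1 hc
    rw [hgv]
    by_contra hlt
    have hkg : cs.length - 1 - k < g := by omega
    have : cs.reverse[cs.length - 1 - k]'(by simpa using (by omega : cs.length - 1 - k < cs.length)) = '#' := by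
      rw [List.getElem_reverse]
      have : cs.length - 1 - (cs.length - 1 - k) = k := by omega
      simp only [this]
      exact hck
    exact hgmin _ hkg this

-- generic: two nonempty lists mutually dominated have the same min / max value
lemma min?_eq_of_dominate (X Y : List Int) (hX : X ≠ []) (hY : Y ≠ [])
    (hXY : ∀ x ∈ X, ∃ y ∈ Y, y ≤ x) (hYX : ∀ y ∈ Y, ∃ x ∈ X, x ≤ y) :
    PySem.List.min? X (fun y => y) = PySem.List.min? Y (fun y => y) := by
  obtain ⟨mx, hmx⟩ := Option.isSome_iff_exists.1
    (Option.ne_none_iff_isSome.1 (fun h => hX ((PySem.List.min?_eq_none_iff (α := Int) (κ := Int) _ _).1 h)))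
  obtain ⟨my, hmy⟩ := Option.isSome_iff_exists.1
    (Option.ne_none_iff_isSome.1 (fun h => hY ((PySem.List.min?_eq_none_iff (α := Int) (κ := Int) _ _).1 h)))
  rw [hmx, hmy]
  have hmxX := PySem.List.min?_mem hmx
  have hmyY := PySem.List.min?_mem hmy
  obtain ⟨y, hyY, hyle⟩ := hXY mx hmxX
  obtain ⟨x, hxX, hxle⟩ := hYX my hmyY
  have h1 : my ≤ y := PySem.List.min?_isMin hmy y hyY
  have h2 : mx ≤ x := PySem.List.min?_isMin hmx x hxX
  congr 1
  omega

lemma max?_eq_of_dominate (X Y : List Int) (hX : X ≠ []) (hY : Y ≠ [])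
    (hXY : ∀ x ∈ X, ∃ y ∈ Y, x ≤ y) (hYX : ∀ y ∈ Y, ∃ x ∈ X, y ≤ x) :
    PySem.List.max? X (fun y => y) = PySem.List.max? Y (fun y => y) := by
  obtain ⟨mx, hmx⟩ := Option.isSome_iff_exists.1
    (Option.ne_none_iff_isSome.1 (fun h => hX ((PySem.List.max?_eq_none_iff (α := Int) (κ := Int) _ _).1 h)))
  obtain ⟨my, hmy⟩ := Option.isSome_iff_exists.1
    (Option.ne_none_iff_isSome.1 (fun h => hY ((PySem.List.max?_eq_none_iff (α := Int) (κ := Int) _ _).1 h)))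
  rw [hmx, hmy]
  have hmxX := PySem.List.max?_mem hmx
  have hmyY := PySem.List.max?_mem hmy
  obtain ⟨y, hyY, hyle⟩ := hXY mx hmxX
  obtain ⟨x, hxX, hxle⟩ := hYX my hmyY
  have h1 : y ≤ my := PySem.List.max?_isMax hmy y hyY
  have h2 : x ≤ mx := PySem.List.max?_isMax hmx x hxX
  congr 1
  omega

lemma mem_colsOf {w : List String} {c : Int} :
    c ∈ colsOf w ↔ ∃ s ∈ w, c ∈ lineColsI s.toList := by
  simp [colsOf]

lemma B_eq_canon (wallpaper : List String) (hpre : Pre_solution wallpaper) :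
    solution_alt wallpaper = canon wallpaper := by
  obtain ⟨s0, hs0, hc0⟩ := hpre
  -- an index with a '#'
  obtain ⟨kw, hkw, hkwe⟩ := List.mem_iff_getElem.1 hs0
  have hexP : ∃ k, hashAt wallpaper k = true := by
    refine ⟨kw, ?_⟩
    rw [hashAt_eq hkw, hkwe]
    simpa using hc0
  -- least / greatest rows with a '#'
  set n := wallpaper.length with hn
  let k0 := Nat.find hexP
  have hPk0 : hashAt wallpaper k0 = true := Nat.find_spec hexP
  have hk0min : ∀ j < k0, hashAt wallpaper j = false := by
    intro j hj
    have := Nat.find_min hexP hj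
    simpa using this
  have hexQ : ∃ j, hashAt wallpaper (n - 1 - j) = true := by
    refine ⟨n - 1 - k0, ?_⟩
    have hk0n : k0 < n := hashAt_lt hPk0
    have : n - 1 - (n - 1 - k0) = k0 := by omega
    rw [this]; exact hPk0
  let j0 := Nat.find hexQ
  set k1 := n - 1 - j0 with hk1def
  have hPk1 : hashAt wallpaper k1 = true := Nat.find_spec hexQ
  have hk1max : ∀ k, hashAt wallpaper k = true → k ≤ k1 := by
    intro k hk
    have hkn : k < n := hashAt_lt hk
    have hj : hashAt wallpaper (n - 1 - (n - 1 - k)) = true := by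
      have : n - 1 - (n - 1 - k) = k := by omega
      rw [this]; exact hk
    have := Nat.find_min' hexQ hj
    omega
  have hk0n : k0 < n := hashAt_lt hPk0
  have hk1n : k1 < n := hashAt_lt hPk1
  -- the two scans
  have htop : scanTop wallpaper 0 = k0 :=
    scanTop_spec wallpaper k0 hPk0 0 (Nat.zero_le _) (fun j _ hjk => hk0min j hjk)
  have hbot : scanBot wallpaper (n - 1) = k1 := by
    refine scanBot_spec wallpaper k1 hPk1 (n - 1) (by omega) ?_
    intro j hj _
    by_contra hjt
    have := hk1max j (by simpa using hjt)
    omega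
  -- min? / max? of rowsOf
  have hrows_min : PySem.List.min? (rowsOf wallpaper) (fun y => y) = some (k0 : Int) := by
    have hne : rowsOf wallpaper ≠ [] := by
      intro h0
      have : (k0 : Int) ∈ rowsOf wallpaper := mem_rowsOf.2 ⟨k0, hk0n, rfl, hPk0⟩
      rw [h0] at this; exact absurd this (List.not_mem_nil)
    obtain ⟨m, hm⟩ := Option.isSome_iff_exists.1
      (Option.ne_none_iff_isSome.1 (fun h => hne ((PySem.List.min?_eq_none_iff (α := Int) (κ := Int) _ _).1 h)))
    rw [hm]
    obtain ⟨k, hkn', rfl, hPk⟩ := mem_rowsOf.1 (PySem.List.min?_mem hm)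
    have hle : ((k : Int)) ≤ (k0 : Int) :=
      PySem.List.min?_isMin hm _ (mem_rowsOf.2 ⟨k0, hk0n, rfl, hPk0⟩)
    have hge : k0 ≤ k := Nat.find_min' hexP hPk
    congr 1
    omega
  have hrows_max : PySem.List.max? (rowsOf wallpaper) (fun y => y) = some (k1 : Int) := by
    have hne : rowsOf wallpaper ≠ [] := by
      intro h0
      have : (k1 : Int) ∈ rowsOf wallpaper := mem_rowsOf.2 ⟨k1, hk1n, rfl, hPk1⟩
      rw [h0] at this; exact absurd this (List.not_mem_nil)
    obtain ⟨m, hm⟩ := Option.isSome_iff_exists.1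
      (Option.ne_none_iff_isSome.1 (fun h => hne ((PySem.List.max?_eq_none_iff (α := Int) (κ := Int) _ _).1 h)))
    rw [hm]
    obtain ⟨k, hkn', rfl, hPk⟩ := mem_rowsOf.1 (PySem.List.max?_mem hm)
    have hle : ((k1 : Int)) ≤ (k : Int) :=
      PySem.List.max?_isMax hm _ (mem_rowsOf.2 ⟨k1, hk1n, rfl, hPk1⟩)
    have hge : k ≤ k1 := hk1max k hPk
    congr 1
    omega
  -- the left / right per-line lists
  set lefts := wallpaper.filterMap (fun line =>
      if line.toList.contains '#' then some (firstHash line.toList) else none) with hlefts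
  set rights := wallpaper.filterMap (fun line =>
      if line.toList.contains '#' then some (lastHash line.toList) else none) with hrights
  have mem_lefts : ∀ y, y ∈ lefts ↔ ∃ s ∈ wallpaper, '#' ∈ s.toList ∧ y = firstHash s.toList := by
    intro y
    rw [hlefts]
    simp only [List.mem_filterMap]
    constructor
    · rintro ⟨line, hline, hsome⟩
      by_cases hc : line.toList.contains '#' = true
      · rw [if_pos hc, Option.some_inj] at hsome
        exact ⟨line, hline, by simpa using hc, hsome.symm⟩
      · rw [if_neg hc] at hsome
        exact absurd hsome (by simp)
    · rintro ⟨line, hline, hc, rfl⟩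
      refine ⟨line, hline, ?_⟩
      rw [if_pos (by simpa using hc)]
  have mem_rights : ∀ y, y ∈ rights ↔ ∃ s ∈ wallpaper, '#' ∈ s.toList ∧ y = lastHash s.toList := by
    intro y
    rw [hrights]
    simp only [List.mem_filterMap]
    constructor
    · rintro ⟨line, hline, hsome⟩
      by_cases hc : line.toList.contains '#' = true
      · rw [if_pos hc, Option.some_inj] at hsome
        exact ⟨line, hline, by simpa using hc, hsome.symm⟩
      · rw [if_neg hc] at hsome
        exact absurd hsome (by simp)
    · rintro ⟨line, hline, hc, rfl⟩
      refine ⟨line, hline, ?_⟩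
      rw [if_pos (by simpa using hc)]
  have hlne : lefts ≠ [] := by
    intro h0
    have : firstHash s0.toList ∈ lefts := (mem_lefts _).2 ⟨s0, hs0, hc0, rfl⟩
    rw [h0] at this; exact absurd this (List.not_mem_nil)
  have hrne : rights ≠ [] := by
    intro h0
    have : lastHash s0.toList ∈ rights := (mem_rights _).2 ⟨s0, hs0, hc0, rfl⟩
    rw [h0] at this; exact absurd this (List.not_mem_nil)
  have hcne : colsOf wallpaper ≠ [] := by
    intro h0
    have : firstHash s0.toList ∈ colsOf wallpaper :=
      mem_colsOf.2 ⟨s0, hs0, (firstHash_spec hc0).1⟩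
    rw [h0] at this; exact absurd this (List.not_mem_nil)
  -- min over cols = min over per-line firsts
  have hmin_cols : PySem.List.min? (colsOf wallpaper) (fun y => y)
      = PySem.List.min? lefts (fun y => y) := by
    refine min?_eq_of_dominate _ _ hcne hlne ?_ ?_
    · intro x hx
      obtain ⟨s, hs, hxs⟩ := mem_colsOf.1 hx
      have hcs : '#' ∈ s.toList := by
        obtain ⟨k, hk, _, hck⟩ := mem_lineColsI.1 hxs
        exact hck ▸ List.getElem_mem hk
      exact ⟨firstHash s.toList, (mem_lefts _).2 ⟨s, hs, hcs, rfl⟩, (firstHash_spec hcs).2 x hxs⟩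
    · intro y hy
      obtain ⟨s, hs, hcs, rfl⟩ := (mem_lefts _).1 hy
      exact ⟨firstHash s.toList, mem_colsOf.2 ⟨s, hs, (firstHash_spec hcs).1⟩, le_rfl⟩
  have hmax_cols : PySem.List.max? (colsOf wallpaper) (fun y => y)
      = PySem.List.max? rights (fun y => y) := by
    refine max?_eq_of_dominate _ _ hcne hrne ?_ ?_
    · intro x hx
      obtain ⟨s, hs, hxs⟩ := mem_colsOf.1 hx
      have hcs : '#' ∈ s.toList := by
        obtain ⟨k, hk, _, hck⟩ := mem_lineColsI.1 hxs
        exact hck ▸ List.getElem_mem hk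
      exact ⟨lastHash s.toList, (mem_rights _).2 ⟨s, hs, hcs, rfl⟩, (lastHash_spec hcs).2 x hxs⟩
    · intro y hy
      obtain ⟨s, hs, hcs, rfl⟩ := (mem_rights _).1 hy
      exact ⟨lastHash s.toList, mem_colsOf.2 ⟨s, hs, (lastHash_spec hcs).1⟩, le_rfl⟩
  -- assemble
  show [((scanTop wallpaper 0 : Nat) : Int),
        (PySem.List.min? lefts (fun y => y)).getD 0,
        ((scanBot wallpaper (wallpaper.length - 1) : Nat) : Int) + 1,
        (PySem.List.max? rights (fun y => y)).getD 0 + 1] = canon wallpaper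
  rw [htop, hbot, canon, hrows_min, hrows_max, hmin_cols, hmax_cols]
  simp

-- ===== VERDICT (by name: the statement is the Claim_ definition above) =====
theorem solution_spec : Claim_equal_solution := by
  intro wallpaper _ hpre
  show solution wallpaper = solution_alt wallpaper
  rw [A_eq_canon wallpaper hpre, B_eq_canon wallpaper hpre]
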